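-- pv_equiv track=rewrite | github.com/TheDataEnthusiast2399/A4_2024 | Assignments/Week5.1_Assignment.py | longest_word
-- ===== SOURCE A (Python) =====
-- def longest_word(users: str) -> str:
--     longest_word = ""
--     current_word = ""
--
--     for ch in users:
--         if "a" <= ch <= "z" or "A" <= ch < "Z":  # If characters --> add in current word
--             current_word += ch
--         else:
--             if len(current_word) > len(longest_word):
--                 longest_word = current_word
--             current_word = ""  # Reset current word
--
--     if len(current_word) > len(longest_word):  # To compare the length of last word
--         longest_word = current_word
--
--     return longest_word
-- ===== SOURCE B (Python) =====
-- def longest_word(users: str) -> str: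
--     # Normalize: keep the allowed letters, turn everything else into a space,
--     # then take the longest whitespace-separated word (first one on ties).
--     cleaned = "".join(ch if ("a" <= ch <= "z" or "A" <= ch < "Z") else " " for ch in users)
--     return max(cleaned.split(), key=len, default="")
-- ===== Notes on version B (the rewrite author's own statement) =====
-- stated objective: idiomatic
-- what changed: Replaces the inline longest/current state machine with an extract-then-reduce pipeline: normalize non-letters to spaces, str.split() into maximal runs, then take the first longest word via max with key=len and an empty default.
import Mathlib
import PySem

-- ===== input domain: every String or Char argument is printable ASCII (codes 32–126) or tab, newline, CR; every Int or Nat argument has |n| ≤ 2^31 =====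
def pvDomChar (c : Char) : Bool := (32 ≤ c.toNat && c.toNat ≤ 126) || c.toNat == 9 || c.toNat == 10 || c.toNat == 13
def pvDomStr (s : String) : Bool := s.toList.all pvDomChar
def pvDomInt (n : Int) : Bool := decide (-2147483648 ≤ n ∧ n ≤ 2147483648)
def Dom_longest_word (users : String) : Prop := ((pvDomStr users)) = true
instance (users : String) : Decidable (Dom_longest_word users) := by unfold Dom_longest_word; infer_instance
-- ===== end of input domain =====

-- B normalizes non-letters to spaces, splits, and takes the first longest word (idiomatic
-- extract-then-reduce instead of A's inline state machine); same result, same O(n) cost.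

-- shared character class of the Python sources: "a" <= ch <= "z" or "A" <= ch < "Z"
def pvLetter (c : Char) : Bool := ('a' ≤ c && c ≤ 'z') || ('A' ≤ c && c < 'Z')

-- ===== PORT A =====
-- loop state: (longest_word, current_word) as lists of chars
def lwStep (st : List Char × List Char) (ch : Char) : List Char × List Char :=
  if pvLetter ch then (st.1, st.2 ++ [ch])
  else ((if st.2.length > st.1.length then st.2 else st.1), [])

def longest_word (users : String) : String :=
  let st := users.toList.foldl lwStep ([], [])
  String.mk (if st.2.length > st.1.length then st.2 else st.1)

-- ===== PORT B =====
-- max(words, key=len): first word of maximal length; [] is the default for an empty list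
def lwPick (b r : List Char) : List Char := if r.length > b.length then r else b

def lwMax (ws : List (List Char)) : List Char :=
  match ws with
  | [] => []
  | w :: ws => ws.foldl lwPick w

def longest_word_alt (users : String) : String :=
  let cleaned := users.toList.map (fun ch => if pvLetter ch then ch else ' ')
  let words := (cleaned.splitOnP (· == ' ')).filter (· ≠ [])  -- str.split(): runs, empties dropped
  String.mk (lwMax words)

-- ===== PRECONDITION & SPEC =====
def Spec_longest_word (users : String) (out : String) : Prop := out = longest_word_alt users
instance (users : String) (out : String) : Decidable (Spec_longest_word users out) := by unfold Spec_longest_word; infer_instance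

-- ===== CLAIM (what is proved, stated in full; the proofs are below) =====
def Claim_equal_longest_word : Prop := ∀ (users : String), Dom_longest_word users → Spec_longest_word users (longest_word users)

-- ===== LEMMAS AND PROOFS =====

theorem pvLetter_ne_space (c : Char) (h : pvLetter c = true) : (c == ' ') = false := by
  by_contra hb
  have : c = ' ' := by
    cases hc : c == ' '
    · exact absurd hc hb
    · exact beq_iff_eq.mp hc
  subst this
  exact absurd h (by decide)

-- A's state machine equals a fold of lwPick over the splitOnP chunks (head extended by current)
theorem lwLoop_chunks (s : List Char) :
    ∀ (longest current : List Char),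
      (let st := s.foldl lwStep (longest, current)
       if st.2.length > st.1.length then st.2 else st.1)
      = List.foldl lwPick longest
          (((s.splitOnP (fun c => !pvLetter c)).modifyHead (current ++ ·))) := by
  induction s with
  | nil =>
    intro longest current
    simp [lwPick]
  | cons ch s ih =>
    intro longest current
    obtain ⟨h, t, hht⟩ := List.exists_cons_of_ne_nil (List.splitOnP_ne_nil (fun c => !pvLetter c) s)
    by_cases hch : pvLetter ch = true
    · have := ih longest (current ++ [ch])
      simp only [List.foldl_cons, lwStep, hch, if_pos] at this ⊢
      rw [this, List.splitOnP_cons, hch]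
      simp [hht, List.modifyHead]
    · have hch' : pvLetter ch = false := by simpa using hch
      have := ih (if current.length > longest.length then current else longest) []
      simp only [List.foldl_cons, lwStep, hch', if_neg, Bool.false_eq_true, not_false_iff] at this ⊢
      rw [this, List.splitOnP_cons, hch']
      simp [hht, List.modifyHead, lwPick]

-- cleaning then splitting on spaces is splitting on non-letters
theorem split_clean (s : List Char) :
    (s.map (fun ch => if pvLetter ch then ch else ' ')).splitOnP (· == ' ')
      = s.splitOnP (fun c => !pvLetter c) := by
  induction s with
  | nil => rfl
  | cons ch s ih =>
    by_cases hch : pvLetter ch = true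
    · simp only [List.map_cons, hch, if_pos, List.splitOnP_cons,
        pvLetter_ne_space ch hch, Bool.not_eq_true', Bool.false_eq_true, ih]
      simp
    · have hch' : pvLetter ch = false := by simpa using hch
      simp [List.splitOnP_cons, hch', ih]

-- dropping empty chunks does not change the fold (lwPick ignores [])
theorem foldl_pick_filter (chunks : List (List Char)) :
    ∀ b, List.foldl lwPick b (chunks.filter (· ≠ [])) = List.foldl lwPick b chunks := by
  induction chunks with
  | nil => intro b; rfl
  | cons c cs ih =>
    intro b
    by_cases hc : c = []
    · subst hc; simpa [lwPick] using ih b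
    · simpa [List.filter_cons, hc] using ih (lwPick b c)

-- the match in B equals a fold from [] when all words are nonempty
theorem match_words (ws : List (List Char)) (hws : ∀ w ∈ ws, w ≠ []) :
    lwMax ws = List.foldl lwPick [] ws := by
  cases ws with
  | nil => rfl
  | cons w ws =>
    have hw : w ≠ [] := hws w (by simp)
    have : lwPick [] w = w := by
      cases w with
      | nil => exact absurd rfl hw
      | cons a l => simp [lwPick]
    simp [lwMax, this]

-- the whole pipeline, on lists
theorem main_list (L : List Char) :
    (if (L.foldl lwStep ([], [])).2.length > (L.foldl lwStep ([], [])).1.length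
     then (L.foldl lwStep ([], [])).2 else (L.foldl lwStep ([], [])).1)
    = lwMax (((L.map (fun ch => if pvLetter ch then ch else ' ')).splitOnP (· == ' ')).filter (· ≠ [])) := by
  rw [split_clean, match_words _ (fun w hw => of_decide_eq_true (List.mem_filter.mp hw).2),
      foldl_pick_filter]
  obtain ⟨h, t, hht⟩ := List.exists_cons_of_ne_nil (List.splitOnP_ne_nil (fun c => !pvLetter c) L)
  have hA := lwLoop_chunks L [] []
  simp only [hht, List.modifyHead, List.nil_append] at hA ⊢
  exact hA

-- ===== VERDICT (by name: the statement is the Claim_ definition above) =====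
theorem longest_word_spec : Claim_equal_longest_word := by
  intro users _
  show longest_word users = longest_word_alt users
  unfold longest_word longest_word_alt
  exact congrArg String.mk (main_list users.toList)
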